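-- pv_equiv track=rewrite | github.com/codenameStarmunch/CodeWars-solutions- | show sequence.py | show_sequence
-- ===== SOURCE A (Python) =====
-- def show_sequence(n):
--     final = ""
--     iter = sum((x + x) - x for x in range(0, n + 1))
--
--     if n < 0:
--         final += f"{n}<0"
--     if n == 0:
--         final += f"{n}=0"
--     else:
--         for x in range(0, n + 1):
--             if x != n:
--                 final += f"{x}+"
--             else:
--                 final += f"{x} = {iter}"
--
--     return final
-- ===== SOURCE B (Python) =====
-- def show_sequence(n):
--     if n < 0:
--         return f"{n}<0"
--     if n == 0:
--         return f"{n}=0"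
--     total = n * (n + 1) // 2
--     return "+".join(str(x) for x in range(n + 1)) + f" = {total}"
-- ===== Notes on version B (the rewrite author's own statement) =====
-- stated objective: simpler
-- what changed: Early returns for the negative and zero cases, a closed-form arithmetic total instead of A's generator sum over the range, and one str.join instead of A's piece-by-piece string-appending loop.
import Mathlib
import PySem

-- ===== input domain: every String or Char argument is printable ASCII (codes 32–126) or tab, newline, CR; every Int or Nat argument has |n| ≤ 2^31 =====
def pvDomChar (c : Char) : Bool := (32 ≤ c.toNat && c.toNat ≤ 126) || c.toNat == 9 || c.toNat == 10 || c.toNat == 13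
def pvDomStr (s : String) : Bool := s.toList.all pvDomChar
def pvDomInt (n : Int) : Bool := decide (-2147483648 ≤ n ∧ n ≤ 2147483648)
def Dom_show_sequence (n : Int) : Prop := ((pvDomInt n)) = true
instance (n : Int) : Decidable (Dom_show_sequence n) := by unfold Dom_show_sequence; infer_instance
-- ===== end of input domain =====

-- ===== PORT A =====
-- A: builds the total by summing (x+x)-x over range(n+1), then appends pieces in a loop.
def show_sequence (n : Int) : String :=
  let final : String := ""
  let iter : Int := ((PySem.List.pyRange 0 (n + 1) 1).map (fun x => (x + x) - x)).sum
  let final : String := if n < 0 then final ++ PySem.Int.toStr n ++ "<0" else final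
  if n = 0 then final ++ PySem.Int.toStr n ++ "=0"
  else
    (PySem.List.pyRange 0 (n + 1) 1).foldl
      (fun acc x =>
        if x ≠ n then acc ++ PySem.Int.toStr x ++ "+"
        else acc ++ PySem.Int.toStr x ++ " = " ++ PySem.Int.toStr iter) final

-- ===== PORT B =====
-- B (simpler): early returns for n<0 and n=0, closed-form total n*(n+1)//2, one '+'-join.
def show_sequence_alt (n : Int) : String :=
  if n < 0 then PySem.Int.toStr n ++ "<0"
  else if n = 0 then PySem.Int.toStr n ++ "=0"
  else
    let total : Int := PySem.Int.floordiv (n * (n + 1)) 2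
    PySem.Str.join "+" ((PySem.List.pyRange 0 (n + 1) 1).map PySem.Int.toStr)
      ++ " = " ++ PySem.Int.toStr total

-- ===== PRECONDITION & SPEC =====
def Spec_show_sequence (n : Int) (out : String) : Prop := out = show_sequence_alt n
instance (n : Int) (out : String) : Decidable (Spec_show_sequence n out) := by unfold Spec_show_sequence; infer_instance

-- ===== CLAIM (what is proved, stated in full; the proofs are below) =====
def Claim_equal_show_sequence : Prop := ∀ (n : Int), Dom_show_sequence n → Spec_show_sequence n (show_sequence n)

-- ===== LEMMAS AND PROOFS =====

theorem pvStrJoin_singleton (sep s : String) : PySem.Str.join sep [s] = s := by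
  apply String.toList_inj.mp
  simp [PySem.Str.toList_join, PySem.Chars.join_singleton]

theorem pvStrJoin_cons (sep s q : String) (rest : List String) :
    PySem.Str.join sep (s :: q :: rest) = s ++ sep ++ PySem.Str.join sep (q :: rest) := by
  apply String.toList_inj.mp
  simp [PySem.Str.toList_join, PySem.Chars.join_cons_cons]

theorem pvSum_pyRange (m : Nat) :
    ((PySem.List.pyRange 0 (m : Int) 1).map (fun x => (x + x) - x)).sum * 2
      = (m : Int) * ((m : Int) - 1) := by
  induction m with
  | zero => simp [PySem.List.pyRange_one_eq_nil]
  | succ k ih =>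
      have h : ((k : Int) + 1) = ((k + 1 : Nat) : Int) := by push_cast; ring
      rw [← h, PySem.List.pyRange_one_succ_right (by positivity)]
      simp only [List.map_append, List.sum_append, List.map_cons, List.map_nil, List.sum_cons,
        List.sum_nil]
      nlinarith [ih]

-- the fold of A's body from acc over range a..n equals acc ++ join ++ tail
theorem pvFold_join (n : Int) (t : String) (hn : 0 < n) :
    ∀ (k : Nat) (a : Int) (acc : String), 0 ≤ a → a ≤ n → k = (n - a).toNat →
    (PySem.List.pyRange a (n + 1) 1).foldl
        (fun acc x =>
          if x ≠ n then acc ++ PySem.Int.toStr x ++ "+"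
          else acc ++ PySem.Int.toStr x ++ " = " ++ t) acc
      = acc ++ PySem.Str.join "+" ((PySem.List.pyRange a (n + 1) 1).map PySem.Int.toStr)
          ++ " = " ++ t := by
  intro k
  induction k with
  | zero =>
      intro a acc _ ha2 hk
      have han : a = n := by omega
      subst han
      rw [PySem.List.pyRange_one_cons (by omega), PySem.List.pyRange_one_eq_nil (by omega)]
      simp [pvStrJoin_singleton, String.append_assoc]
  | succ k ih =>
      intro a acc ha1 ha2 hk
      have hlt : a < n := by omega
      rw [PySem.List.pyRange_one_cons (by omega)]
      have hrest : PySem.List.pyRange (a + 1) (n + 1) 1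
          = (a + 1) :: PySem.List.pyRange (a + 1 + 1) (n + 1) 1 :=
        PySem.List.pyRange_one_cons (by omega)
      simp only [List.foldl_cons, List.map_cons]
      rw [if_pos (by omega : a ≠ n)]
      rw [ih (a + 1) (acc ++ PySem.Int.toStr a ++ "+") (by omega) (by omega) (by omega)]
      rw [hrest, List.map_cons, pvStrJoin_cons]
      simp [String.append_assoc]

theorem pvIter_eq (n : Int) (hn : 0 < n) :
    ((PySem.List.pyRange 0 (n + 1) 1).map (fun x => (x + x) - x)).sum
      = PySem.Int.floordiv (n * (n + 1)) 2 := by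
  set iter := ((PySem.List.pyRange 0 (n + 1) 1).map (fun x => (x + x) - x)).sum with hiter
  have hm : ((n + 1).toNat : Int) = n + 1 := by omega
  have h := pvSum_pyRange (n + 1).toNat
  rw [hm] at h
  rw [← hiter] at h
  symm
  rw [PySem.Int.floordiv_eq_iff_of_pos (by omega)]
  constructor <;> nlinarith [h]

-- ===== VERDICT (by name: the statement is the Claim_ definition above) =====
theorem show_sequence_spec : Claim_equal_show_sequence := by
  intro n _
  unfold Spec_show_sequence show_sequence show_sequence_alt
  rcases lt_trichotomy n 0 with hneg | hzero | hpos
  · rw [if_pos hneg, if_neg (by omega : ¬ n = 0), if_pos hneg,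
      PySem.List.pyRange_one_eq_nil (by omega)]
    simp
  · subst hzero
    simp
  · rw [if_neg (by omega : ¬ n < 0), if_neg (by omega : ¬ n = 0),
      if_neg (by omega : ¬ n < 0), if_neg (by omega : ¬ n = 0)]
    rw [pvFold_join n _ hpos (n - 0).toNat 0 "" (by omega) (by omega) rfl]
    rw [pvIter_eq n hpos]
    simp
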